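-- pv_equiv track=rewrite | github.com/imejcab/Programacion | Repaso_Python/Dia8/Ejercicio8.py | contar_vocal
-- ===== SOURCE A (Python) =====
-- def contar_vocal (palabra):
--     vocal=["a","e","i","o","u"]
--     contador_vocal=0
--     for i in vocal:
--         contador=0
--         while(contador<len(palabra)):
--             if(i==palabra[contador]):
--                 contador_vocal+=1
--                 contador=len(palabra)
--             else:
--                 contador+=1
--     return contador_vocal
-- ===== SOURCE B (Python) =====
-- def contar_vocal(palabra):
--     encontradas = set()
--     for c in palabra:
--         if c in "aeiou":
--             encontradas.add(c)
--     return len(encontradas)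
-- ===== Notes on version B (the rewrite author's own statement) =====
-- stated objective: idiomatic
-- what changed: Single forward pass over the word accumulating the set of distinct vowels encountered and returning its size, instead of five separate early-terminating index-based scans of the word (one per vowel).
import Mathlib
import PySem

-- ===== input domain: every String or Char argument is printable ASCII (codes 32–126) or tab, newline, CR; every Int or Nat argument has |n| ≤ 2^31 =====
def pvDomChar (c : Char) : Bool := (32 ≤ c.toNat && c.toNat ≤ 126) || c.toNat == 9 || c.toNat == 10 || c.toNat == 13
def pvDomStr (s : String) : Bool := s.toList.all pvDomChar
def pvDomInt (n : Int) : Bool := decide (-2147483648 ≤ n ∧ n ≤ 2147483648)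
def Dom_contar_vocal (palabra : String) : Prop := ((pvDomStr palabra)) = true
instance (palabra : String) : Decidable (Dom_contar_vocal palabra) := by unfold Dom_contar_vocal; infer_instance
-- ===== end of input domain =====

-- B replaces A's five per-vowel early-terminating scans of the word by one forward pass
-- that accumulates the set of distinct vowels encountered (objective: idiomatic; same behaviour).

-- ===== PORT A =====
-- the inner 'while contador < len(palabra)' loop of A; setting contador = len on a match
-- exits the loop, so a match returns cv + 1 immediately.
def contarWhile (cs : List Char) (i : Char) (contador : Nat) (cv : Int) : Int :=
  if h : contador < cs.length then
    if i == cs[contador] then cv + 1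
    else contarWhile cs i (contador + 1) cv
  else cv
termination_by cs.length - contador

def contar_vocal (palabra : String) : Int :=
  (['a', 'e', 'i', 'o', 'u']).foldl (fun cv i => contarWhile palabra.toList i 0 cv) 0

-- ===== PORT B =====
-- Source B: one pass over palabra; 'c in "aeiou"' is single-char substring membership, ported
-- as membership in the vowel character list (exact for single characters).
def contar_vocal_alt (palabra : String) : Int :=
  ((palabra.toList.foldl
      (fun s c => if c ∈ ['a', 'e', 'i', 'o', 'u'] then PySem.Set.add s c else s)
      (PySem.Set.empty : PySem.Set Char)).length : Int)

-- ===== PRECONDITION & SPEC =====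
def Spec_contar_vocal (palabra : String) (out : Int) : Prop := out = contar_vocal_alt palabra
instance (palabra : String) (out : Int) : Decidable (Spec_contar_vocal palabra out) := by unfold Spec_contar_vocal; infer_instance

-- ===== CLAIM (what is proved, stated in full; the proofs are below) =====
def Claim_equal_contar_vocal : Prop := ∀ (palabra : String), Dom_contar_vocal palabra → Spec_contar_vocal palabra (contar_vocal palabra)

-- ===== LEMMAS AND PROOFS =====

-- A's inner while loop: +1 iff the vowel occurs in the remaining suffix of the word.
theorem contarWhile_eq (cs : List Char) (i : Char) (contador : Nat) (cv : Int) :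
    contarWhile cs i contador cv = if i ∈ cs.drop contador then cv + 1 else cv := by
  fun_induction contarWhile cs i contador cv with
  | case1 contador h hm =>
      have hi : i = cs[contador] := by simpa using hm
      have hmem : i ∈ List.drop contador cs := by
        rw [List.drop_eq_getElem_cons h, hi]; exact List.mem_cons_self ..
      simp [hmem]
  | case2 contador h hm ih =>
      have hne : i ≠ cs[contador] := by simpa using hm
      have hiff : i ∈ List.drop contador cs ↔ i ∈ List.drop (contador + 1) cs := by
        rw [List.drop_eq_getElem_cons h, List.mem_cons]
        exact ⟨fun hc => hc.resolve_left hne, Or.inr⟩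
      rw [ih]
      simp only [hiff]
  | case3 contador h =>
      simp [List.drop_eq_nil_of_le (Nat.le_of_not_lt h)]

-- counting fold = filter length
theorem foldl_count_filter (cs : List Char) (l : List Char) (cv : Int) :
    l.foldl (fun cv i => if i ∈ cs then cv + 1 else cv) cv
      = cv + ((l.filter (fun i => decide (i ∈ cs))).length : Int) := by
  induction l generalizing cv with
  | nil => simp
  | cons x xs ih =>
      simp only [List.foldl_cons, List.filter_cons]
      by_cases hx : x ∈ cs
      · simp only [hx, decide_true, if_true, ih, List.length_cons]
        push_cast
        ring
      · simp [hx, ih]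

-- B's fold: membership in the accumulated set
theorem mem_fold_set (l : List Char) (s : PySem.Set Char) (x : Char) :
    x ∈ l.foldl (fun s c => if c ∈ ['a', 'e', 'i', 'o', 'u'] then PySem.Set.add s c else s) s
      ↔ x ∈ s ∨ (x ∈ l ∧ x ∈ ['a', 'e', 'i', 'o', 'u']) := by
  induction l generalizing s with
  | nil => simp
  | cons c cs ih =>
      simp only [List.foldl_cons]
      by_cases hc : c ∈ ['a', 'e', 'i', 'o', 'u']
      · rw [if_pos hc, ih, PySem.Set.mem_add]
        constructor
        · rintro ((h | rfl) | ⟨h1, h2⟩)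
          · exact Or.inl h
          · exact Or.inr ⟨List.mem_cons_self .., hc⟩
          · exact Or.inr ⟨List.mem_cons_of_mem _ h1, h2⟩
        · rintro (h | ⟨h1, h2⟩)
          · exact Or.inl (Or.inl h)
          · rcases List.mem_cons.mp h1 with rfl | h1
            · exact Or.inl (Or.inr rfl)
            · exact Or.inr ⟨h1, h2⟩
      · rw [if_neg hc, ih]
        constructor
        · rintro (h | ⟨h1, h2⟩)
          · exact Or.inl h
          · exact Or.inr ⟨List.mem_cons_of_mem _ h1, h2⟩
        · rintro (h | ⟨h1, h2⟩)
          · exact Or.inl h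
          · rcases List.mem_cons.mp h1 with rfl | h1
            · exact absurd h2 hc
            · exact Or.inr ⟨h1, h2⟩

-- B's fold preserves set nodup-ness
theorem nodup_fold_set (l : List Char) (s : PySem.Set Char) (hs : s.Nodup) :
    (l.foldl (fun s c => if c ∈ ['a', 'e', 'i', 'o', 'u'] then PySem.Set.add s c else s) s).Nodup := by
  induction l generalizing s with
  | nil => exact hs
  | cons c cs ih =>
      simp only [List.foldl_cons]
      by_cases hc : c ∈ ['a', 'e', 'i', 'o', 'u']
      · rw [if_pos hc]; exact ih _ (PySem.Set.nodup_add s c hs)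
      · rw [if_neg hc]; exact ih _ hs

-- ===== VERDICT (by name: the statement is the Claim_ definition above) =====
theorem contar_vocal_spec : Claim_equal_contar_vocal := by
  intro palabra _
  unfold Spec_contar_vocal contar_vocal contar_vocal_alt
  set cs := palabra.toList with hcs
  -- A side: each vowel scan contributes 1 iff it occurs in the word
  have hA : (['a', 'e', 'i', 'o', 'u']).foldl (fun cv i => contarWhile cs i 0 cv) 0
      = (['a', 'e', 'i', 'o', 'u']).foldl (fun cv i => if i ∈ cs then cv + 1 else cv) 0 := by
    apply PySem.List.foldl_congr_mem
    intro cv i _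
    rw [contarWhile_eq]
    simp
  rw [hA, foldl_count_filter]
  -- B side: the final set is a permutation of the vowels occurring in the word
  set final := cs.foldl (fun s c => if c ∈ ['a', 'e', 'i', 'o', 'u'] then PySem.Set.add s c else s)
      (PySem.Set.empty : PySem.Set Char) with hfinal
  have h1 : (['a', 'e', 'i', 'o', 'u'].filter (fun i => decide (i ∈ cs))).Nodup :=
    List.Nodup.filter _ (by decide)
  have h2 : final.Nodup := nodup_fold_set cs PySem.Set.empty (by simp [PySem.Set.empty])
  have hperm : (['a', 'e', 'i', 'o', 'u'].filter (fun i => decide (i ∈ cs))).Perm final := by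
    apply (List.perm_ext_iff_of_nodup h1 h2).mpr
    intro x
    rw [hfinal, mem_fold_set]
    simp [and_comm]
  rw [hperm.length_eq]
  ring
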